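-- pv_equiv track=rewrite | github.com/djkelleher/taskflows | taskflows/serialization.py | _infer_type_from_content
-- ===== SOURCE A (Python) =====
-- from typing import (
--     Any,
--     Dict,
--     List,
--     Literal,
--     Optional,
--     Sequence,
--     Type,
--     TypeVar,
--     Union,
--     get_args,
--     get_origin,
-- )
--
-- _FIELD_TYPE_MAP: Dict[str, str] = {
--     "restart_policy": "RestartPolicy",
--     "cgroup_config": "CgroupConfig",
--     "start_schedule": "Schedule",
--     "stop_schedule": "Schedule",
--     "restart_schedule": "Schedule",
-- }
--
-- _TYPE_SIGNATURE_KEYS: Dict[frozenset, str] = {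
--     # Venv: has env_name
--     frozenset(["env_name"]): "Venv",
--     # DockerContainer: has image
--     frozenset(["image"]): "DockerContainer",
--     # Calendar: has schedule (string pattern)
--     frozenset(["schedule"]): "Calendar",
--     # Periodic: has period and start_on
--     frozenset(["period", "start_on"]): "Periodic",
--     frozenset(["period"]): "Periodic",
--     # Volume: has host_path and container_path
--     frozenset(["host_path", "container_path"]): "Volume",
--     # RestartPolicy: has condition (when it's a dict)
--     frozenset(["condition"]): "RestartPolicy",
--     # Memory constraint
--     frozenset(["amount", "constraint"]): "Memory",
--     # CPUPressure constraint
--     frozenset(["max_percent", "timespan"]): "CPUPressure",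
--     frozenset(["max_percent"]): "CPUPressure",
--     # CgroupConfig: has memory_limit or cpu_quota (common cgroup fields)
--     frozenset(["memory_limit"]): "CgroupConfig",
--     frozenset(["cpu_quota"]): "CgroupConfig",
--     frozenset(["cpu_shares"]): "CgroupConfig",
--     frozenset(["pids_limit"]): "CgroupConfig",
-- }
--
-- def _infer_type_from_content(data: Dict[str, Any], field_name: Optional[str] = None) -> Optional[str]:
--     """Infer the type from dict content based on its keys.
--
--     Args:
--         data: The dictionary to analyze.
--         field_name: Optional field name for context.
--
--     Returns:
--         The inferred type name, or None if can't be determined.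
--     """
--     if not isinstance(data, dict):
--         return None
--
--     keys = set(data.keys()) - {"type"}  # Exclude type key itself
--
--     # Check for signature keys (most specific first - larger sets)
--     for signature_keys, type_name in sorted(_TYPE_SIGNATURE_KEYS.items(), key=lambda x: -len(x[0])):
--         if signature_keys <= keys:
--             return type_name
--
--     # Use field name to infer type if content-based inference fails
--     if field_name and field_name in _FIELD_TYPE_MAP:
--         return _FIELD_TYPE_MAP[field_name]
--
--     return None
-- ===== SOURCE B (Python) =====
-- from typing import Any, Dict, Optional
--
-- _FIELD_TYPE_MAP: Dict[str, str] = {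
--     "restart_policy": "RestartPolicy",
--     "cgroup_config": "CgroupConfig",
--     "start_schedule": "Schedule",
--     "stop_schedule": "Schedule",
--     "restart_schedule": "Schedule",
-- }
--
-- _TYPE_SIGNATURE_KEYS: Dict[frozenset, str] = {
--     frozenset(["env_name"]): "Venv",
--     frozenset(["image"]): "DockerContainer",
--     frozenset(["schedule"]): "Calendar",
--     frozenset(["period", "start_on"]): "Periodic",
--     frozenset(["period"]): "Periodic",
--     frozenset(["host_path", "container_path"]): "Volume",
--     frozenset(["condition"]): "RestartPolicy",
--     frozenset(["amount", "constraint"]): "Memory",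
--     frozenset(["max_percent", "timespan"]): "CPUPressure",
--     frozenset(["max_percent"]): "CPUPressure",
--     frozenset(["memory_limit"]): "CgroupConfig",
--     frozenset(["cpu_quota"]): "CgroupConfig",
--     frozenset(["cpu_shares"]): "CgroupConfig",
--     frozenset(["pids_limit"]): "CgroupConfig",
-- }
--
-- def _infer_type_from_content(data: Dict[str, Any], field_name: Optional[str] = None) -> Optional[str]:
--     """Infer the type from dict content based on its keys (single pass, no sort)."""
--     if not isinstance(data, dict):
--         return None
--
--     keys = set(data) - {"type"}
--
--     # One pass over the signatures, keeping the largest matching signature;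
--     # strict '>' keeps the first-seen signature on length ties, which is exactly
--     # what a stable descending sort followed by first-match returns.
--     best_name: Optional[str] = None
--     best_len = -1
--     for signature_keys, type_name in _TYPE_SIGNATURE_KEYS.items():
--         if len(signature_keys) > best_len and signature_keys <= keys:
--             best_name = type_name
--             best_len = len(signature_keys)
--     if best_name is not None:
--         return best_name
--
--     if field_name and field_name in _FIELD_TYPE_MAP:
--         return _FIELD_TYPE_MAP[field_name]
--
--     return None
-- ===== Notes on version B (the rewrite author's own statement) =====
-- stated objective: simpler
-- what changed: Replaces A's per-call stable descending sort of the signature table followed by first-match with a single pass over the table that keeps the longest matching signature (strict '>' preserves the first signature on length ties, which equals stable-sort-then-first-match).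
import Mathlib
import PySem

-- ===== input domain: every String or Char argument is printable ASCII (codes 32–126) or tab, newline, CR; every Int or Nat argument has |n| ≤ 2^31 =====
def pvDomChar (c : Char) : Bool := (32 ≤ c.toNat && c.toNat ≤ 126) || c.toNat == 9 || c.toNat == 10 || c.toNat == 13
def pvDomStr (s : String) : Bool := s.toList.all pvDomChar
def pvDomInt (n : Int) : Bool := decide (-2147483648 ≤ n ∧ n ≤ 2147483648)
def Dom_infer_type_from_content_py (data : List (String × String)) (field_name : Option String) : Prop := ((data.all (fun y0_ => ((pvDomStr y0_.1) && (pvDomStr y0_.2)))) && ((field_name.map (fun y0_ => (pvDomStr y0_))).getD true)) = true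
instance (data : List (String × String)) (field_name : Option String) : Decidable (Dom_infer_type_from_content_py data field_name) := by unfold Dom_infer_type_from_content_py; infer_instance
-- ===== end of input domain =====

-- B replaces A's per-call stable descending sort of the signature table by a single pass
-- that keeps the longest matching signature (strict '>' preserves first-on-tie): simpler, no sort.


-- module-level constants shared by both Pythons (same module)
def pvFieldTypeMap : PySem.Dict String String :=
  PySem.Dict.ofList
  [("restart_policy", "RestartPolicy"), ("cgroup_config", "CgroupConfig"),
   ("start_schedule", "Schedule"), ("stop_schedule", "Schedule"), ("restart_schedule", "Schedule")]

-- _TYPE_SIGNATURE_KEYS.items() in insertion order (frozenset → PySem.Set String)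
def pvTypeSigItems : List (PySem.Set String × String) :=
  [(PySem.Set.ofList ["env_name"], "Venv"),
   (PySem.Set.ofList ["image"], "DockerContainer"),
   (PySem.Set.ofList ["schedule"], "Calendar"),
   (PySem.Set.ofList ["period", "start_on"], "Periodic"),
   (PySem.Set.ofList ["period"], "Periodic"),
   (PySem.Set.ofList ["host_path", "container_path"], "Volume"),
   (PySem.Set.ofList ["condition"], "RestartPolicy"),
   (PySem.Set.ofList ["amount", "constraint"], "Memory"),
   (PySem.Set.ofList ["max_percent", "timespan"], "CPUPressure"),
   (PySem.Set.ofList ["max_percent"], "CPUPressure"),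
   (PySem.Set.ofList ["memory_limit"], "CgroupConfig"),
   (PySem.Set.ofList ["cpu_quota"], "CgroupConfig"),
   (PySem.Set.ofList ["cpu_shares"], "CgroupConfig"),
   (PySem.Set.ofList ["pids_limit"], "CgroupConfig")]

-- the shared tail: 'if field_name and field_name in _FIELD_TYPE_MAP: return _FIELD_TYPE_MAP[field_name]; return None'
def pvFieldFallback (field_name : Option String) : Option String :=
  match field_name with
  | none => none
  | some fn =>
    if fn ≠ "" && PySem.Dict.contains pvFieldTypeMap fn then PySem.Dict.get? pvFieldTypeMap fn
    else none

-- ===== PORT A =====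
-- A's loop: 'for signature_keys, type_name in sorted(...): if signature_keys <= keys: return type_name'
def pvFindSig : List (PySem.Set String × String) → PySem.Set String → Option String
  | [], _ => none
  | (sig, name) :: rest, keys =>
    if PySem.Set.issubset sig keys then some name else pvFindSig rest keys

def infer_type_from_content_py (data : List (String × String)) (field_name : Option String) : Option String :=
  let keys := PySem.Set.diff (PySem.Set.ofList (data.map Prod.fst)) (PySem.Set.ofList ["type"])
  match pvFindSig (PySem.List.sorted pvTypeSigItems (fun x => -(PySem.Set.len x.1)) false) keys with
  | some name => some name
  | none => pvFieldFallback field_name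

-- ===== PORT B =====
-- B's loop body, as a named helper: keep the longest matching signature (strict '>' = first wins ties)
def pvStep (keys : PySem.Set String) (st : Option String × Int) (p : PySem.Set String × String) : Option String × Int :=
  if PySem.Set.len p.1 > st.2 && PySem.Set.issubset p.1 keys then (some p.2, PySem.Set.len p.1) else st

def infer_type_from_content_py_alt (data : List (String × String)) (field_name : Option String) : Option String :=
  let keys := PySem.Set.diff (PySem.Set.ofList (data.map Prod.fst)) (PySem.Set.ofList ["type"])
  let best := pvTypeSigItems.foldl (pvStep keys) (none, -1)
  match best.1 with
  | some name => some name
  | none => pvFieldFallback field_name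

-- ===== PRECONDITION & SPEC =====
def Spec_infer_type_from_content_py (data : List (String × String)) (field_name : Option String) (out : Option String) : Prop := out = infer_type_from_content_py_alt data field_name
instance (data : List (String × String)) (field_name : Option String) (out : Option String) : Decidable (Spec_infer_type_from_content_py data field_name out) := by unfold Spec_infer_type_from_content_py; infer_instance

-- ===== CLAIM (what is proved, stated in full; the proofs are below) =====
def Claim_equal_infer_type_from_content_py : Prop := ∀ (data : List (String × String)) (field_name : Option String), Dom_infer_type_from_content_py data field_name → Spec_infer_type_from_content_py data field_name (infer_type_from_content_py data field_name)

-- ===== LEMMAS AND PROOFS =====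

-- the stable descending sort of the concrete table, named: all length-2 signatures
-- (insertion order) followed by all length-1 signatures (insertion order)
def pvSortedSigItems : List (PySem.Set String × String) :=
  [(PySem.Set.ofList ["period", "start_on"], "Periodic"),
   (PySem.Set.ofList ["host_path", "container_path"], "Volume"),
   (PySem.Set.ofList ["amount", "constraint"], "Memory"),
   (PySem.Set.ofList ["max_percent", "timespan"], "CPUPressure"),
   (PySem.Set.ofList ["env_name"], "Venv"),
   (PySem.Set.ofList ["image"], "DockerContainer"),
   (PySem.Set.ofList ["schedule"], "Calendar"),
   (PySem.Set.ofList ["period"], "Periodic"),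
   (PySem.Set.ofList ["condition"], "RestartPolicy"),
   (PySem.Set.ofList ["max_percent"], "CPUPressure"),
   (PySem.Set.ofList ["memory_limit"], "CgroupConfig"),
   (PySem.Set.ofList ["cpu_quota"], "CgroupConfig"),
   (PySem.Set.ofList ["cpu_shares"], "CgroupConfig"),
   (PySem.Set.ofList ["pids_limit"], "CgroupConfig")]

set_option maxHeartbeats 1600000 in
theorem pvSorted_eq :
    PySem.List.sorted pvTypeSigItems (fun x => -(PySem.Set.len x.1)) false = pvSortedSigItems := by
  decide

-- 'is a length-2 (resp. length-1) signature matching keys'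
def pvQ2 (keys : PySem.Set String) (p : PySem.Set String × String) : Bool :=
  PySem.Set.len p.1 == 2 && PySem.Set.issubset p.1 keys

def pvQ1 (keys : PySem.Set String) (p : PySem.Set String × String) : Bool :=
  PySem.Set.len p.1 == 1 && PySem.Set.issubset p.1 keys

theorem pvFold_stuck (keys : PySem.Set String) (l : List (PySem.Set String × String))
    (h : ∀ p ∈ l, PySem.Set.len p.1 ≤ 2) (st : Option String × Int) (hst : st.2 = 2) :
    l.foldl (pvStep keys) st = st := by
  induction l with
  | nil => rfl
  | cons p l ih =>
    have hp := h p (List.mem_cons_self ..)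
    have hstep : pvStep keys st p = st := by
      simp only [pvStep]
      rw [if_neg]
      simp only [Bool.and_eq_true, decide_eq_true_eq, not_and]
      intro hgt
      omega
    rw [List.foldl_cons, hstep]
    exact ih (fun q hq => h q (List.mem_cons_of_mem _ hq))

theorem pvFold_one (keys : PySem.Set String) (l : List (PySem.Set String × String))
    (h : ∀ p ∈ l, PySem.Set.len p.1 ≤ 2) (n : String) :
    (l.foldl (pvStep keys) (some n, 1)).1 =
      match l.find? (pvQ2 keys) with
      | some p => some p.2
      | none => some n := by
  induction l generalizing n with
  | nil => rfl
  | cons p l ih =>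
    have hp := h p (List.mem_cons_self ..)
    have hrest : ∀ q ∈ l, PySem.Set.len q.1 ≤ 2 := fun q hq => h q (List.mem_cons_of_mem _ hq)
    by_cases hq : pvQ2 keys p = true
    · obtain ⟨hl2, hsub⟩ : (List.length p.1 : Int) = 2 ∧ ∀ x ∈ p.1, x ∈ keys := by
        simpa [pvQ2] using hq
      have hl2n : List.length p.1 = 2 := by exact_mod_cast hl2
      have hstep : pvStep keys (some n, 1) p = (some p.2, 2) := by
        simp [pvStep, hl2n]
        exact hsub
      rw [List.foldl_cons, hstep, pvFold_stuck keys l hrest _ rfl, List.find?_cons_of_pos hq]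
    · have hstep : pvStep keys (some n, 1) p = (some n, 1) := by
        have hcast : PySem.Set.len p.1 = (List.length p.1 : Int) := rfl
        simp only [pvStep]
        rw [if_neg]
        simp only [Bool.and_eq_true, decide_eq_true_eq, not_and]
        intro hgt hsub
        exact hq (by simp [pvQ2, hsub]; omega)
      rw [List.foldl_cons, hstep, ih hrest, List.find?_cons_of_neg (by simpa using hq)]

theorem pvFold_main (keys : PySem.Set String) (l : List (PySem.Set String × String))
    (h : ∀ p ∈ l, 1 ≤ PySem.Set.len p.1 ∧ PySem.Set.len p.1 ≤ 2) :
    (l.foldl (pvStep keys) (none, -1)).1 =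
      match l.find? (pvQ2 keys) with
      | some p => some p.2
      | none => (l.find? (pvQ1 keys)).map Prod.snd := by
  induction l with
  | nil => rfl
  | cons p l ih =>
    obtain ⟨hp1, hp2⟩ := h p (List.mem_cons_self ..)
    have hrest : ∀ q ∈ l, 1 ≤ PySem.Set.len q.1 ∧ PySem.Set.len q.1 ≤ 2 :=
      fun q hq => h q (List.mem_cons_of_mem _ hq)
    have hrest2 : ∀ q ∈ l, PySem.Set.len q.1 ≤ 2 := fun q hq => (hrest q hq).2
    have hcast : PySem.Set.len p.1 = (List.length p.1 : Int) := rfl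
    by_cases hq2 : pvQ2 keys p = true
    · obtain ⟨hl2, hsub⟩ : (List.length p.1 : Int) = 2 ∧ ∀ x ∈ p.1, x ∈ keys := by
        simpa [pvQ2] using hq2
      have hl2n : List.length p.1 = 2 := by exact_mod_cast hl2
      have hstep : pvStep keys (none, -1) p = (some p.2, 2) := by
        simp [pvStep, hl2n]
        exact hsub
      rw [List.foldl_cons, hstep, pvFold_stuck keys l hrest2 _ rfl, List.find?_cons_of_pos hq2]
    · by_cases hq1 : pvQ1 keys p = true
      · obtain ⟨hl1, hsub⟩ : (List.length p.1 : Int) = 1 ∧ ∀ x ∈ p.1, x ∈ keys := by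
          simpa [pvQ1] using hq1
        have hl1n : List.length p.1 = 1 := by exact_mod_cast hl1
        have hstep : pvStep keys (none, -1) p = (some p.2, 1) := by
          simp [pvStep, hl1n]
          exact hsub
        rw [List.foldl_cons, hstep, pvFold_one keys l hrest2 p.2,
            List.find?_cons_of_neg (by simpa using hq2), List.find?_cons_of_pos hq1]
        cases l.find? (pvQ2 keys) <;> simp
      · have hsub : PySem.Set.issubset p.1 keys = false := by
          cases hh : PySem.Set.issubset p.1 keys
          · rfl
          · exfalso
            rcases (by omega : List.length p.1 = 1 ∨ List.length p.1 = 2) with h1 | h2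
            · exact hq1 (by simp [pvQ1, h1, hh])
            · exact hq2 (by simp [pvQ2, h2, hh])
        have hstep : pvStep keys (none, -1) p = (none, -1) := by
          simp [pvStep, hsub]
        rw [List.foldl_cons, hstep, ih hrest,
            List.find?_cons_of_neg (by simpa using hq2), List.find?_cons_of_neg (by simpa using hq1)]

theorem pvLen_bounds : ∀ p ∈ pvTypeSigItems, 1 ≤ PySem.Set.len p.1 ∧ PySem.Set.len p.1 ≤ 2 := by
  decide

-- first-match over the concrete sorted table, characterised by the two find?s over the insertion-order table
set_option maxHeartbeats 1600000 in
theorem pvA_char (keys : PySem.Set String) :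
    pvFindSig pvSortedSigItems keys =
      match pvTypeSigItems.find? (pvQ2 keys) with
      | some p => some p.2
      | none => (pvTypeSigItems.find? (pvQ1 keys)).map Prod.snd := by
  simp only [pvFindSig, pvSortedSigItems, pvTypeSigItems, List.find?_cons, List.find?_nil, pvQ2, pvQ1]
  generalize PySem.Set.issubset (PySem.Set.ofList ["env_name"]) keys = t1
  generalize PySem.Set.issubset (PySem.Set.ofList ["image"]) keys = t2
  generalize PySem.Set.issubset (PySem.Set.ofList ["schedule"]) keys = t3
  generalize PySem.Set.issubset (PySem.Set.ofList ["period", "start_on"]) keys = t4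
  generalize PySem.Set.issubset (PySem.Set.ofList ["period"]) keys = t5
  generalize PySem.Set.issubset (PySem.Set.ofList ["host_path", "container_path"]) keys = t6
  generalize PySem.Set.issubset (PySem.Set.ofList ["condition"]) keys = t7
  generalize PySem.Set.issubset (PySem.Set.ofList ["amount", "constraint"]) keys = t8
  generalize PySem.Set.issubset (PySem.Set.ofList ["max_percent", "timespan"]) keys = t9
  generalize PySem.Set.issubset (PySem.Set.ofList ["max_percent"]) keys = t10
  generalize PySem.Set.issubset (PySem.Set.ofList ["memory_limit"]) keys = t11
  generalize PySem.Set.issubset (PySem.Set.ofList ["cpu_quota"]) keys = t12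
  generalize PySem.Set.issubset (PySem.Set.ofList ["cpu_shares"]) keys = t13
  generalize PySem.Set.issubset (PySem.Set.ofList ["pids_limit"]) keys = t14
  revert t1 t2 t3 t4 t5 t6 t7 t8 t9 t10 t11 t12 t13 t14
  decide

set_option maxHeartbeats 1600000 in
theorem pvLoop_eq (keys : PySem.Set String) :
    pvFindSig pvSortedSigItems keys = (pvTypeSigItems.foldl (pvStep keys) (none, -1)).1 := by
  rw [pvA_char keys]
  exact (pvFold_main keys pvTypeSigItems pvLen_bounds).symm

-- ===== VERDICT (by name: the statement is the Claim_ definition above) =====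
set_option maxHeartbeats 1600000 in
set_option maxRecDepth 8192 in
theorem infer_type_from_content_py_spec : Claim_equal_infer_type_from_content_py := by
  intro data field_name _
  show infer_type_from_content_py data field_name = infer_type_from_content_py_alt data field_name
  have h : pvFindSig (PySem.List.sorted pvTypeSigItems (fun x => -(PySem.Set.len x.1)) false)
        (PySem.Set.diff (PySem.Set.ofList (data.map Prod.fst)) (PySem.Set.ofList ["type"]))
      = (pvTypeSigItems.foldl
          (pvStep (PySem.Set.diff (PySem.Set.ofList (data.map Prod.fst)) (PySem.Set.ofList ["type"])))
          (none, -1)).1 := by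
    rw [pvSorted_eq]
    exact pvLoop_eq _
  exact congrArg
    (fun r => match r with | some name => some name | none => pvFieldFallback field_name) h
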